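-- pv_equiv track=rewrite | github.com/mguharoy/Complexome | Complexome.py | _add_complex_participants
-- ===== SOURCE A (Python) =====
-- def _add_complex_participants(
--     participants: str, members: list[str] | None = None
-- ) -> list[str]:
--     if members is None:
--         members = []
--
--     for participant in participants.split("|"):
--         participant_id = participant.split("(")[0]
--         if "[" in participant_id:
--             # This is in the case of molecule sets
--             # (paralogs that cannot be distinguished in this context).
--             participant_ids = (
--                 str(participant_id).replace("[", "").replace("]", "").split(",")
--             )
--             for paralog in participant_ids:
--                 if paralog not in members:
--                     members.append(paralog)
--         elif participant_id not in members:
--             members.append(participant_id)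
--
--     return members
-- ===== SOURCE B (Python) =====
-- def _add_complex_participants(participants, members=None):
--     if members is None:
--         members = []
--     tokens = []
--     for participant in participants.split("|"):
--         participant_id = participant.split("(")[0]
--         if "[" in participant_id:
--             tokens += participant_id.replace("[", "").replace("]", "").split(",")
--         else:
--             tokens += [participant_id]
--     seen = set(members)
--     members.extend(t for t in dict.fromkeys(tokens) if t not in seen)
--     return members
-- ===== Notes on version B (the rewrite author's own statement) =====
-- stated objective: alternative
-- what changed: B first collects all ids into a flat tokens list with no dedup, then dedups once with dict.fromkeys and filters against a set of the initial members before a single extend, instead of A's interleaved per-token linear membership checks and appends.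
import Mathlib
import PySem

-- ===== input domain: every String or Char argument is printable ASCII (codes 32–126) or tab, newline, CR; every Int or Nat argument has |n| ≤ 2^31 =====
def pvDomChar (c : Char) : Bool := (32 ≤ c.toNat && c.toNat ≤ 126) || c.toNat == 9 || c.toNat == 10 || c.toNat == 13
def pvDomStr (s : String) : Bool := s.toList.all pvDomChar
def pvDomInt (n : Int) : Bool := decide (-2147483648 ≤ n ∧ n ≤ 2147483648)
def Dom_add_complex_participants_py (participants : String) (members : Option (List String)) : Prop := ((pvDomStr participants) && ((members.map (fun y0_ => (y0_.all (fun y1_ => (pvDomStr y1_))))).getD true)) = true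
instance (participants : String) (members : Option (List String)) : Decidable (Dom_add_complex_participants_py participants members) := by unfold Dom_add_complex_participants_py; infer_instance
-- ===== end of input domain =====

-- B collects all ids flat, then dedups once via dict.fromkeys + a set filter and one extend,
-- instead of A's interleaved per-token membership checks and appends (same return value;
-- A mutates `members` in place in Python; the equivalence proved is about the return value only).

-- ===== PORT A =====
-- participants.split("|") — the separator is nonempty, so split? never returns none (exact)
def pvSplit (s sep : String) : List String := (PySem.Str.split? s sep).getD []

-- split with a nonempty separator always yields a nonempty list, so [0] never raises (exact)
def pvHead0 (l : List String) : String := l.headD ""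

def add_complex_participants_py (participants : String) (members : Option (List String)) : List String :=
  let members0 := members.getD []
  (pvSplit participants "|").foldl (fun ms participant =>
    let participant_id := pvHead0 (pvSplit participant "(")
    if PySem.Str.isIn "[" participant_id then
      (pvSplit (PySem.Str.replace (PySem.Str.replace participant_id "[" "") "]" "") ",").foldl
        (fun ms paralog => if paralog ∈ ms then ms else ms ++ [paralog]) ms
    else if participant_id ∈ ms then ms else ms ++ [participant_id]) members0

-- ===== PORT B =====
def add_complex_participants_py_alt (participants : String) (members : Option (List String)) : List String :=
  let members0 := members.getD []
  let tokens := (pvSplit participants "|").foldl (fun tks participant =>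
    let participant_id := pvHead0 (pvSplit participant "(")
    if PySem.Str.isIn "[" participant_id then
      tks ++ pvSplit (PySem.Str.replace (PySem.Str.replace participant_id "[" "") "]" "") ","
    else tks ++ [participant_id]) []
  let seen : PySem.Set String := PySem.Set.ofList members0
  -- dict.fromkeys(tokens) as ordered first-occurrence dedup = PySem.List.dedup
  members0 ++ (PySem.List.dedup tokens).filter (fun t => !(PySem.Set.contains seen t))

-- ===== PRECONDITION & SPEC =====
def Spec_add_complex_participants_py (participants : String) (members : Option (List String)) (out : List String) : Prop := out = add_complex_participants_py_alt participants members
instance (participants : String) (members : Option (List String)) (out : List String) : Decidable (Spec_add_complex_participants_py participants members out) := by unfold Spec_add_complex_participants_py; infer_instance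

-- ===== CLAIM (what is proved, stated in full; the proofs are below) =====
def Claim_equal_add_complex_participants_py : Prop := ∀ (participants : String) (members : Option (List String)), Dom_add_complex_participants_py participants members → Spec_add_complex_participants_py participants members (add_complex_participants_py participants members)

-- ===== LEMMAS AND PROOFS =====

-- the ids contributed by one participant
def pvIds (participant : String) : List String :=
  let participant_id := pvHead0 (pvSplit participant "(")
  if PySem.Str.isIn "[" participant_id then
    pvSplit (PySem.Str.replace (PySem.Str.replace participant_id "[" "") "]" "") ","
  else [participant_id]

-- A's outer loop = one Set.update with the concatenation of all participants' ids
theorem pv_foldl_update_flatMap (l : List String) (ms : List String) :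
    l.foldl (fun ms p => PySem.Set.update ms (pvIds p)) ms = PySem.Set.update ms (l.flatMap pvIds) := by
  induction l generalizing ms with
  | nil => rfl
  | cons x xs ih => simp [List.flatMap_cons, PySem.Set.update_append, ih]

-- A's dedup-append step is PySem.Set.add
theorem pv_step_eq_add (ms : List String) (t : String) :
    (if t ∈ ms then ms else ms ++ [t]) = PySem.Set.add ms t := (PySem.Set.add_eq_ite ms t).symm

-- ===== VERDICT (by name: the statement is the Claim_ definition above) =====
theorem add_complex_participants_py_spec : Claim_equal_add_complex_participants_py := by
  intro participants members _
  unfold Spec_add_complex_participants_py add_complex_participants_py add_complex_participants_py_alt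
  set ms0 := members.getD [] with hms0
  set l := pvSplit participants "|" with hl
  -- rewrite A's body: each participant contributes Set.update ms (pvIds p)
  have hA : l.foldl (fun ms participant =>
      let participant_id := pvHead0 (pvSplit participant "(")
      if PySem.Str.isIn "[" participant_id then
        (pvSplit (PySem.Str.replace (PySem.Str.replace participant_id "[" "") "]" "") ",").foldl
          (fun ms paralog => if paralog ∈ ms then ms else ms ++ [paralog]) ms
      else if participant_id ∈ ms then ms else ms ++ [participant_id]) ms0
      = l.foldl (fun ms p => PySem.Set.update ms (pvIds p)) ms0 := by
    apply PySem.List.foldl_congr_mem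
    intro ms p _
    simp only [pvIds]
    split
    · simp only [PySem.Set.update]
      apply PySem.List.foldl_congr_mem
      intro acc t _
      exact pv_step_eq_add acc t
    · simp [PySem.Set.update, PySem.Set.add_eq_ite]
  -- rewrite B's token loop: it builds l.flatMap pvIds
  have hB : l.foldl (fun tks participant =>
      let participant_id := pvHead0 (pvSplit participant "(")
      if PySem.Str.isIn "[" participant_id then
        tks ++ pvSplit (PySem.Str.replace (PySem.Str.replace participant_id "[" "") "]" "") ","
      else tks ++ [participant_id]) ([] : List String)
      = l.flatMap pvIds := by
    have h := PySem.List.foldl_append_eq_flatMap (g := pvIds) (l := l) (acc := ([] : List String))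
    simp only [List.nil_append] at h
    rw [← h]
    apply PySem.List.foldl_congr_mem
    intro acc p _
    simp only [pvIds]
    split <;> rfl
  simp only []
  rw [hA, hB, pv_foldl_update_flatMap, PySem.Set.update_eq_append_filter]
  congr 1
  apply List.filter_congr
  intro t _
  simp [PySem.Set.contains_eq_listContains, PySem.Set.mem_ofList]
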